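-- pv_equiv track=rewrite | github.com/Himeshpopat/Color-Blindness-Detection-System | app.py | _count_crossings
-- ===== SOURCE A (Python) =====
-- D15_CONFUSION_AXES = {
--     "Protan":  (frozenset({1, 2}),  frozenset({9,  10})),
--     "Deutan":  (frozenset({3, 4}),  frozenset({11, 12})),
--     "Tritan":  (frozenset({5, 6}),  frozenset({13, 14})),
-- }
--
-- def _count_crossings(user_order: list) -> dict:
--     """
--     Count how many of the user's connecting lines cross each confusion axis.
--
--     A crossing occurs when a user step (u_a → u_b) spans across the
--     midpoint of a named confusion axis (i.e. one pole is on each side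
--     of the axis boundary in hue space).
--
--     Returns a dict: axis_name → crossing_count.
--     """
--     crossings = {axis: 0 for axis in D15_CONFUSION_AXES}
--
--     for i in range(len(user_order) - 1):
--         a = user_order[i]
--         b = user_order[i + 1]
--         step_set = frozenset({a, b})
--
--         for axis_name, (pole1, pole2) in D15_CONFUSION_AXES.items():
--             def near(cap_id, pole):
--                 return any(abs(cap_id - p) <= 2 for p in pole)
--
--             if (near(a, pole1) and near(b, pole2)) or \
--                 (near(a, pole2) and near(b, pole1)):
--                 crossings[axis_name] += 1
--
--     return crossings
-- ===== SOURCE B (Python) =====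
-- D15_CONFUSION_AXES = {
--     "Protan":  (frozenset({1, 2}),  frozenset({9,  10})),
--     "Deutan":  (frozenset({3, 4}),  frozenset({11, 12})),
--     "Tritan":  (frozenset({5, 6}),  frozenset({13, 14})),
-- }
--
-- def _count_crossings(user_order: list) -> dict:
--     """Classify each cap to a side of every axis, then count sign flips."""
--     result = {}
--     for axis, (pole1, pole2) in D15_CONFUSION_AXES.items():
--         side = []
--         for x in user_order:
--             if any(abs(x - p) <= 2 for p in pole1):
--                 side.append(1)
--             elif any(abs(x - p) <= 2 for p in pole2):
--                 side.append(-1)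
--             else:
--                 side.append(0)
--         result[axis] = sum(1 for s, t in zip(side, side[1:]) if s * t == -1)
--     return result
-- ===== Notes on version B (the rewrite author's own statement) =====
-- stated objective: simpler
-- what changed: Instead of an index loop over steps with a nested per-axis conditional updating a counter dict, B classifies each cap once per axis into a +1/-1/0 side list and then counts adjacent sign flips (side product = -1) over zipped neighbours.
import Mathlib
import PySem

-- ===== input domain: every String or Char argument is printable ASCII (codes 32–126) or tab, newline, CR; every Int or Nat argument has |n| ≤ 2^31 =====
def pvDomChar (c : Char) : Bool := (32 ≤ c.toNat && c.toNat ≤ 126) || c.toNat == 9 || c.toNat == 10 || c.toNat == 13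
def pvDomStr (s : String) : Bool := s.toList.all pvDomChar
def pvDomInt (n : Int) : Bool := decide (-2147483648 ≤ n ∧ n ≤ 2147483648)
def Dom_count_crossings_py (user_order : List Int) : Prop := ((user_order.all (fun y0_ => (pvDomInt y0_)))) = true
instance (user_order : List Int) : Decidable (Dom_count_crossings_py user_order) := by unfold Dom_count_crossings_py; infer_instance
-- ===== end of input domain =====

-- B makes the per-step/per-axis conditional of A into a per-cap side classification (+1/-1/0)
-- followed by a count of adjacent sign flips; objective: simpler decomposition, same O(n) cost.

-- ===== PORT A =====
-- D15_CONFUSION_AXES (frozensets ported as lists; only used under `any`, so order is irrelevant)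
def axesA : List (String × List Int × List Int) :=
  [("Protan", [1, 2], [9, 10]), ("Deutan", [3, 4], [11, 12]), ("Tritan", [5, 6], [13, 14])]

-- near(cap_id, pole) = any(abs(cap_id - p) <= 2 for p in pole)
def nearA (cap : Int) (pole : List Int) : Bool := pole.any (fun p => decide (|cap - p| ≤ 2))

def count_crossings_py (user_order : List Int) : List (String × Int) :=
  let crossings : PySem.Dict String Int :=
    axesA.foldl (fun d ax => d.insert ax.1 0) PySem.Dict.empty
  let final :=
    (PySem.List.pyRange 0 ((user_order.length : Int) - 1) 1).foldl (fun d i =>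
      let a := PySem.List.pyGetD user_order i 0
      let b := PySem.List.pyGetD user_order (i + 1) 0
      axesA.foldl (fun d ax =>
        if (nearA a ax.2.1 && nearA b ax.2.2) || (nearA a ax.2.2 && nearA b ax.2.1)
        then d.modify ax.1 0 (· + 1)
        else d) d) crossings
  final.items

-- ===== PORT B =====
-- side classification: +1 near pole1, -1 near pole2, else 0
def sideB (x : Int) (pole1 pole2 : List Int) : Int :=
  if pole1.any (fun p => decide (|x - p| ≤ 2)) then 1
  else if pole2.any (fun p => decide (|x - p| ≤ 2)) then -1
  else 0

def count_crossings_py_alt (user_order : List Int) : List (String × Int) :=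
  (axesA.foldl (fun d ax =>
      let side := user_order.foldl (fun acc x => acc ++ [sideB x ax.2.1 ax.2.2]) []
      d.insert ax.1
        ((side.zip side.tail).foldl (fun acc st => if st.1 * st.2 = -1 then acc + 1 else acc) 0))
    PySem.Dict.empty).items

-- ===== PRECONDITION & SPEC =====
def Spec_count_crossings_py (user_order : List Int) (out : List (String × Int)) : Prop := out = count_crossings_py_alt user_order
instance (user_order : List Int) (out : List (String × Int)) : Decidable (Spec_count_crossings_py user_order out) := by unfold Spec_count_crossings_py; infer_instance

-- ===== CLAIM (what is proved, stated in full; the proofs are below) =====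
def Claim_equal_count_crossings_py : Prop := ∀ (user_order : List Int), Dom_count_crossings_py user_order → Spec_count_crossings_py user_order (count_crossings_py user_order)

-- ===== LEMMAS AND PROOFS =====

-- A's per-step crossing test for one axis
def crossF (p1 p2 : List Int) (a b : Int) : Bool :=
  (nearA a p1 && nearA b p2) || (nearA a p2 && nearA b p1)

-- one Dict.modify step on the literal-keyed counter dict (computes by rfl)
theorem mP (x y z : Int) : (PySem.Dict.mk [("Protan", x), ("Deutan", y), ("Tritan", z)]).modify "Protan" 0 (· + 1) = PySem.Dict.mk [("Protan", x + 1), ("Deutan", y), ("Tritan", z)] := rfl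
theorem mD (x y z : Int) : (PySem.Dict.mk [("Protan", x), ("Deutan", y), ("Tritan", z)]).modify "Deutan" 0 (· + 1) = PySem.Dict.mk [("Protan", x), ("Deutan", y + 1), ("Tritan", z)] := rfl
theorem mT (x y z : Int) : (PySem.Dict.mk [("Protan", x), ("Deutan", y), ("Tritan", z)]).modify "Tritan" 0 (· + 1) = PySem.Dict.mk [("Protan", x), ("Deutan", y), ("Tritan", z + 1)] := rfl

-- A's index loop on the literal-key dict: each axis counter accumulates a countP
theorem loopA (uo : List Int) (l : List Int) (x y z : Int) :
    l.foldl (fun d i =>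
      axesA.foldl (fun d ax =>
        if (nearA (PySem.List.pyGetD uo i 0) ax.2.1 && nearA (PySem.List.pyGetD uo (i + 1) 0) ax.2.2)
            || (nearA (PySem.List.pyGetD uo i 0) ax.2.2 && nearA (PySem.List.pyGetD uo (i + 1) 0) ax.2.1)
        then d.modify ax.1 0 (· + 1)
        else d) d)
      (PySem.Dict.mk [("Protan", x), ("Deutan", y), ("Tritan", z)])
    = PySem.Dict.mk
        [("Protan", x + (l.countP (fun i => crossF [1,2] [9,10] (PySem.List.pyGetD uo i 0) (PySem.List.pyGetD uo (i+1) 0)) : Int)),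
         ("Deutan", y + (l.countP (fun i => crossF [3,4] [11,12] (PySem.List.pyGetD uo i 0) (PySem.List.pyGetD uo (i+1) 0)) : Int)),
         ("Tritan", z + (l.countP (fun i => crossF [5,6] [13,14] (PySem.List.pyGetD uo i 0) (PySem.List.pyGetD uo (i+1) 0)) : Int))] := by
  induction l generalizing x y z with
  | nil => simp
  | cons i l ih =>
    rw [List.foldl_cons]
    rw [show (fun (d : PySem.Dict String Int) (ax : String × List Int × List Int) =>
          if (nearA (PySem.List.pyGetD uo i 0) ax.2.1 && nearA (PySem.List.pyGetD uo (i + 1) 0) ax.2.2)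
              || (nearA (PySem.List.pyGetD uo i 0) ax.2.2 && nearA (PySem.List.pyGetD uo (i + 1) 0) ax.2.1)
          then d.modify ax.1 0 (· + 1)
          else d)
        = (fun (d : PySem.Dict String Int) (ax : String × List Int × List Int) =>
          if crossF ax.2.1 ax.2.2 (PySem.List.pyGetD uo i 0) (PySem.List.pyGetD uo (i + 1) 0)
          then d.modify ax.1 0 (· + 1)
          else d) from rfl]
    simp only [axesA, List.foldl_cons, List.foldl_nil, List.countP_cons]
    cases hP : crossF [1,2] [9,10] (PySem.List.pyGetD uo i 0) (PySem.List.pyGetD uo (i+1) 0) <;>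
    cases hD : crossF [3,4] [11,12] (PySem.List.pyGetD uo i 0) (PySem.List.pyGetD uo (i+1) 0) <;>
    cases hT : crossF [5,6] [13,14] (PySem.List.pyGetD uo i 0) (PySem.List.pyGetD uo (i+1) 0) <;>
    simp only [if_true, if_false, Bool.false_eq_true, mP, mD, mT] <;>
    refine (ih _ _ _).trans ?_ <;>
    simp only [PySem.Dict.mk.injEq, List.cons.injEq, Prod.mk.injEq, and_true, true_and] <;>
    push_cast <;> omega

-- index loop over range(n-1) ↔ zip of adjacent pairs (generic in the pair test)
theorem idx_zip (f : Int → Int → Bool) (uo : List Int) :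
    (List.range (uo.length - 1)).countP
        (fun k => f (uo.getD k 0) (uo.getD (k + 1) 0))
    = (uo.zip uo.tail).countP (fun p => f p.1 p.2) := by
  induction uo with
  | nil => simp
  | cons x rest ih =>
    cases rest with
    | nil => simp
    | cons y t =>
      simp only [List.length_cons, Nat.add_sub_cancel, List.range_succ_eq_map,
        List.countP_cons, List.countP_map, List.tail_cons, List.zip_cons_cons,
        Function.comp_def, List.getD_cons_succ, List.getD_cons_zero]
      have h := ih
      simp only [List.length_cons, Nat.add_sub_cancel, List.tail_cons,
        List.getD_cons_succ] at h
      rw [h]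

theorem pyIdx_zip (f : Int → Int → Bool) (uo : List Int) :
    (PySem.List.pyRange 0 ((uo.length : Int) - 1) 1).countP
        (fun i => f (PySem.List.pyGetD uo i 0) (PySem.List.pyGetD uo (i + 1) 0))
    = (uo.zip uo.tail).countP (fun p => f p.1 p.2) := by
  rw [PySem.List.pyRange_one, List.countP_map]
  have h0 : ((uo.length : Int) - 1 - 0).toNat = uo.length - 1 := by omega
  rw [h0, ← idx_zip f uo]
  apply List.countP_congr
  intro k hk
  simp only [List.mem_range] at hk
  simp only [Function.comp_def, zero_add]
  rw [PySem.List.pyGetD_natCast]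
  rw [show ((k : Int) + 1) = ((k + 1 : Nat) : Int) from by push_cast; ring]
  rw [PySem.List.pyGetD_natCast]

-- pointwise: A's crossing test for an axis = B's side-product test (the three axes)
theorem pointP (a b : Int) :
    crossF [1,2] [9,10] a b = decide (sideB a [1,2] [9,10] * sideB b [1,2] [9,10] = -1) := by
  simp only [crossF, nearA, sideB, List.any_cons, List.any_nil, Bool.or_false]
  split_ifs <;> simp_all [abs_le] <;> omega

theorem pointD (a b : Int) :
    crossF [3,4] [11,12] a b = decide (sideB a [3,4] [11,12] * sideB b [3,4] [11,12] = -1) := by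
  simp only [crossF, nearA, sideB, List.any_cons, List.any_nil, Bool.or_false]
  split_ifs <;> simp_all [abs_le] <;> omega

theorem pointT (a b : Int) :
    crossF [5,6] [13,14] a b = decide (sideB a [5,6] [13,14] * sideB b [5,6] [13,14] = -1) := by
  simp only [crossF, nearA, sideB, List.any_cons, List.any_nil, Bool.or_false]
  split_ifs <;> simp_all [abs_le] <;> omega

-- B's per-axis value = countP over adjacent pairs of the side-product test
theorem altAxis (uo : List Int) (p1 p2 : List Int) :
    (let side := uo.foldl (fun acc x => acc ++ [sideB x p1 p2]) []
     (side.zip side.tail).foldl (fun acc st => if st.1 * st.2 = -1 then acc + 1 else acc) (0 : Int))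
    = ((uo.zip uo.tail).countP (fun p => decide (sideB p.1 p1 p2 * sideB p.2 p1 p2 = -1)) : Int) := by
  simp only [PySem.List.foldl_append_singleton_eq_map, List.nil_append]
  rw [PySem.List.foldl_ite_add_one]
  rw [← List.map_tail]
  rw [List.zip_map, List.countP_map]
  simp only [zero_add, Nat.cast_inj]
  exact List.countP_congr (fun p _ => by simp [Prod.map])

-- ===== VERDICT (by name: the statement is the Claim_ definition above) =====
theorem count_crossings_py_spec : Claim_equal_count_crossings_py := by
  intro uo _
  unfold Spec_count_crossings_py count_crossings_py count_crossings_py_alt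
  simp only []
  rw [show (axesA.foldl (fun d ax => d.insert ax.1 0) PySem.Dict.empty : PySem.Dict String Int)
      = PySem.Dict.mk [("Protan", 0), ("Deutan", 0), ("Tritan", 0)] from rfl]
  rw [loopA uo]
  rw [pyIdx_zip (crossF [1,2] [9,10]) uo, pyIdx_zip (crossF [3,4] [11,12]) uo,
      pyIdx_zip (crossF [5,6] [13,14]) uo]
  have hp := altAxis uo [1,2] [9,10]
  have hd := altAxis uo [3,4] [11,12]
  have ht := altAxis uo [5,6] [13,14]
  simp only [] at hp hd ht
  simp only [axesA, List.foldl_cons, List.foldl_nil, hp, hd, ht]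
  simp only [zero_add]
  have eP : (uo.zip uo.tail).countP (fun p => crossF [1,2] [9,10] p.1 p.2)
      = (uo.zip uo.tail).countP (fun p => decide (sideB p.1 [1,2] [9,10] * sideB p.2 [1,2] [9,10] = -1)) :=
    List.countP_congr (fun p _ => by rw [pointP])
  have eD : (uo.zip uo.tail).countP (fun p => crossF [3,4] [11,12] p.1 p.2)
      = (uo.zip uo.tail).countP (fun p => decide (sideB p.1 [3,4] [11,12] * sideB p.2 [3,4] [11,12] = -1)) :=
    List.countP_congr (fun p _ => by rw [pointD])
  have eT : (uo.zip uo.tail).countP (fun p => crossF [5,6] [13,14] p.1 p.2)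
      = (uo.zip uo.tail).countP (fun p => decide (sideB p.1 [5,6] [13,14] * sideB p.2 [5,6] [13,14] = -1)) :=
    List.countP_congr (fun p _ => by rw [pointT])
  rw [eP, eD, eT]
  rfl
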